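-- pv_equiv track=rewrite | github.com/IsacSouzaCampos/unificador_gicon | Model/lib.py | order_m_regs
-- ===== SOURCE A (Python) =====
-- def order_m_regs(texts_m_regs: list) -> list:
--     ordered_m_regs = list()
--     regs0_lst = list()
--     regs1_lst = list()
--
--     current_reg0 = list(texts_m_regs[0][0].keys())[0].split('|')[1]
--     current_reg1 = list(texts_m_regs[1][0].keys())[0].split('|')[1]
--     i = j = 0
--     while i < len(texts_m_regs[0]):
--         reg0 = texts_m_regs[0][i]
--         if list(reg0.keys())[0].split('|')[1] != current_reg0:
--             while j < len(texts_m_regs[1]):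
--                 reg1 = texts_m_regs[1][j]
--                 if list(reg1.keys())[0].split('|')[1] != current_reg1:
--                     ordered_m_regs += regs0_lst + regs1_lst
--                     regs0_lst = []
--                     regs1_lst = []
--                     current_reg0 = list(reg0.keys())[0].split('|')[1]
--                     current_reg1 = list(reg1.keys())[0].split('|')[1]
--                     break
--                 else:
--                     regs1_lst.append(reg1)
--                     j += 1
--         else:
--             regs0_lst.append(reg0)
--             i += 1
--
--     if i == len(texts_m_regs[0]):
--         ordered_m_regs += regs0_lst + texts_m_regs[1][j:]
--     else:
--         ordered_m_regs += texts_m_regs[0][i:] + regs1_lst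
--     return ordered_m_regs
-- ===== SOURCE B (Python) =====
-- def order_m_regs(texts_m_regs: list) -> list:
--     def grp(reg):
--         return list(reg.keys())[0].split('|')[1]
--
--     def runs(lst):
--         if not lst:
--             return []
--         out = []
--         cur = [lst[0]]
--         g = grp(lst[0])
--         for reg in lst[1:]:
--             g2 = grp(reg)
--             if g2 == g:
--                 cur.append(reg)
--             else:
--                 out.append(cur)
--                 cur = [reg]
--                 g = g2
--         out.append(cur)
--         return out
--
--     runs0 = runs(texts_m_regs[0])
--     runs1 = runs(texts_m_regs[1])
--     result = []
--     for t in range(len(runs0) - 1):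
--         result += runs0[t] + runs1[t]
--     if runs0:
--         result += runs0[-1]
--         for r in runs1[len(runs0) - 1:]:
--             result += r
--     return result
-- ===== Notes on version B (the rewrite author's own statement) =====
-- stated objective: simpler
-- what changed: Replaces the index-juggling nested while loops (cursor pairs, run accumulators, flush-on-boundary, break flags) by a one-pass split of each list into consecutive same-group runs followed by a direct zip-style interleave of the runs, with the last run of list 0 absorbing the remaining tail of list 1.
import Mathlib
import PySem

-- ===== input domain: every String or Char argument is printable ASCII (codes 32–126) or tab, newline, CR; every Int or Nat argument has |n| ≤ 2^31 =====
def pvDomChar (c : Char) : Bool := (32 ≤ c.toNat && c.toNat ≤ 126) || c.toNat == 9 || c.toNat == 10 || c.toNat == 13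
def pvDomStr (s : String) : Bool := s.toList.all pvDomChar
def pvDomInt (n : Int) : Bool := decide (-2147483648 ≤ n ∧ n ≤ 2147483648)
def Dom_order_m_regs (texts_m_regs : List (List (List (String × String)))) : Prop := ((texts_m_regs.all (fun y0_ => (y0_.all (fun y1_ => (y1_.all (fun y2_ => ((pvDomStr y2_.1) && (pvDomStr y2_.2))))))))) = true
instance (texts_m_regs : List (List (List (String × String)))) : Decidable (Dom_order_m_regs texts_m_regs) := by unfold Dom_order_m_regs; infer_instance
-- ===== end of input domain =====

-- B replaces A's nested index-cursor while loops by a one-pass split into consecutive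
-- same-group runs followed by a direct interleave of the runs (objective: simpler).

-- ===== PORT A =====
-- `list(reg.keys())[0].split('|')[1]`, the group of a record, shared by both ports (B names it `grp`,
-- A writes it inline).  Exact via PySem.Chars.splitOn / pyGetD; where Python raises (empty dict, or a
-- key without '|') it returns [] — such inputs are outside Pre_.
def pvGrp (reg : List (String × String)) : List Char :=
  match reg with
  | [] => []
  | (k, _) :: _ => PySem.List.pyGetD (PySem.Chars.splitOn k.toList ['|']) 1 []

-- A's inner `while j < len(texts_m_regs[1])` loop; returns (broke, regs1_lst, current_reg1, j)
def pvInnerA (list1 : List (List (String × String))) (cur1 : List Char)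
    (regs1 : List (List (String × String))) (j : Nat) :
    Bool × List (List (String × String)) × List Char × Nat :=
  if _h : j < list1.length then
    let reg1 := list1.getD j []
    if pvGrp reg1 ≠ cur1 then (true, regs1, pvGrp reg1, j)
    else pvInnerA list1 cur1 (regs1 ++ [reg1]) (j + 1)
  else (false, regs1, cur1, j)
termination_by list1.length - j

-- A's outer `while i < len(texts_m_regs[0])` loop; the fuel only makes it total (the Python loops
-- forever when list 0 has more group runs than list 1 — outside Pre_).
-- State: (ordered_m_regs, regs0_lst, regs1_lst, i, j).
def pvLoopA (list0 list1 : List (List (String × String))) :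
    Nat → List (List (String × String)) → List (List (String × String)) →
    List (List (String × String)) → List Char → List Char → Nat → Nat →
    List (List (String × String)) × List (List (String × String)) ×
    List (List (String × String)) × Nat × Nat
  | 0, ordered, regs0, regs1, _, _, i, j => (ordered, regs0, regs1, i, j)
  | fuel + 1, ordered, regs0, regs1, cur0, cur1, i, j =>
    if i < list0.length then
      let reg0 := list0.getD i []
      if pvGrp reg0 ≠ cur0 then
        match pvInnerA list1 cur1 regs1 j with
        | (true, regs1', cur1', j') =>
            pvLoopA list0 list1 fuel (ordered ++ regs0 ++ regs1') [] [] (pvGrp reg0) cur1' i j'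
        | (false, regs1', cur1', j') =>
            pvLoopA list0 list1 fuel ordered regs0 regs1' cur0 cur1' i j'
      else pvLoopA list0 list1 fuel ordered (regs0 ++ [reg0]) regs1 cur0 cur1 (i + 1) j
    else (ordered, regs0, regs1, i, j)

-- texts_m_regs[0] / [1] raise IndexError when missing (outside Pre_); getD is the total form.
def order_m_regs (texts_m_regs : List (List (List (String × String)))) : List (List (String × String)) :=
  let list0 := texts_m_regs.getD 0 []
  let list1 := texts_m_regs.getD 1 []
  let cur0 := pvGrp (list0.getD 0 [])
  let cur1 := pvGrp (list1.getD 0 [])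
  match pvLoopA list0 list1 (2 * list0.length + 2) [] [] [] cur0 cur1 0 0 with
  | (ordered, regs0, regs1, i, j) =>
    if i = list0.length then ordered ++ regs0 ++ list1.drop j
    else ordered ++ list0.drop i ++ regs1

-- ===== PORT B =====
-- B's `runs(lst)`: one pass splitting a list into maximal consecutive same-group runs.
def pvRunsB (lst : List (List (String × String))) : List (List (List (String × String))) :=
  match lst with
  | [] => []
  | r0 :: rest =>
    let st := rest.foldl
      (fun (acc : List (List (List (String × String))) × List (List (String × String)) × List Char) reg =>
        let g2 := pvGrp reg
        if g2 = acc.2.2 then (acc.1, acc.2.1 ++ [reg], acc.2.2)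
        else (acc.1 ++ [acc.2.1], [reg], g2))
      ([], [r0], pvGrp r0)
    st.1 ++ [st.2.1]

def order_m_regs_alt (texts_m_regs : List (List (List (String × String)))) : List (List (String × String)) :=
  let runs0 := pvRunsB (texts_m_regs.getD 0 [])
  let runs1 := pvRunsB (texts_m_regs.getD 1 [])
  let result := (List.range (runs0.length - 1)).foldl
      (fun acc t => acc ++ runs0.getD t [] ++ runs1.getD t []) []
  match runs0.getLast? with
  | none => result
  | some last => (runs1.drop (runs0.length - 1)).foldl (fun acc r => acc ++ r) (result ++ last)

-- ===== PRECONDITION & SPEC =====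
-- Pre_-side helpers (they do not touch either port): a record's first key must exist and contain '|',
-- and the number of adjacent group changes, stating termination of A's loops declaratively.
def pvKeyOk (reg : List (String × String)) : Bool :=
  match reg with
  | [] => false
  | (k, _) :: _ => 2 ≤ (PySem.Chars.splitOn k.toList ['|']).length

-- Pre_ excludes exactly: inputs where the Python A raises (missing element 0 or 1, an empty list 0 or
-- list 1, an empty dict or a first key without '|') and inputs where A loops forever (list 0 with more
-- group runs than list 1).  Requiring well-formed keys of ALL of list 1 is slightly narrower than A,
-- which never reads the keys of list 1 past its scan (see cites).
def pvChanges (l : List (List (String × String))) : Nat :=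
  ((l.zip l.tail).filter (fun p => pvGrp p.1 ≠ pvGrp p.2)).length

def Pre_order_m_regs (texts_m_regs : List (List (List (String × String)))) : Prop :=
  texts_m_regs.getD 0 [] ≠ [] ∧ texts_m_regs.getD 1 [] ≠ [] ∧
  (texts_m_regs.getD 0 []).all pvKeyOk = true ∧ (texts_m_regs.getD 1 []).all pvKeyOk = true ∧
  pvChanges (texts_m_regs.getD 0 []) ≤ pvChanges (texts_m_regs.getD 1 [])
instance (texts_m_regs : List (List (List (String × String)))) : Decidable (Pre_order_m_regs texts_m_regs) := by
  unfold Pre_order_m_regs; infer_instance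

def pvWitness_order_m_regs : (List (List (List (String × String)))) :=
  [[[("a|x", "1")], [("b|y", "2")]], [[("c|x", "3")], [("d|y", "4")], [("e|y", "5")]]]

def Spec_order_m_regs (texts_m_regs : List (List (List (String × String)))) (out : List (List (String × String))) : Prop := out = order_m_regs_alt texts_m_regs
instance (texts_m_regs : List (List (List (String × String)))) (out : List (List (String × String))) : Decidable (Spec_order_m_regs texts_m_regs out) := by unfold Spec_order_m_regs; infer_instance

-- ===== CLAIM (what is proved, stated in full; the proofs are below) =====
def Claim_equal_order_m_regs : Prop := ∀ (texts_m_regs : List (List (List (String × String)))), Dom_order_m_regs texts_m_regs → Pre_order_m_regs texts_m_regs → Spec_order_m_regs texts_m_regs (order_m_regs texts_m_regs)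

-- ===== LEMMAS AND PROOFS =====

def pvRunsFrom (cur : List (List (String × String))) (g : List Char) :
    List (List (String × String)) → List (List (List (String × String)))
  | [] => [cur]
  | r :: rest =>
    if pvGrp r = g then pvRunsFrom (cur ++ [r]) g rest
    else cur :: pvRunsFrom [r] (pvGrp r) rest

def pvRuns (l : List (List (String × String))) : List (List (List (String × String))) :=
  match l with
  | [] => []
  | r :: rest => pvRunsFrom [r] (pvGrp r) rest

-- canonical target: interleave the runs of list 0 with the (still flat) list 1
def pvInter : List (List (List (String × String))) → List (List (String × String)) → List (List (String × String))
  | [], _ => []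
  | [c], v => c ++ v
  | c :: c2 :: rs, v =>
    match v with
    | [] => c
    | x :: vr => c ++ (x :: vr.takeWhile (fun r => pvGrp r = pvGrp x)) ++
        pvInter (c2 :: rs) (vr.dropWhile (fun r => pvGrp r = pvGrp x))

lemma pvRunsFrom_eq (rest : List (List (String × String))) :
    ∀ (cur : List (List (String × String))) (g : List Char),
      pvRunsFrom cur g rest
        = (cur ++ rest.takeWhile (fun x => pvGrp x = g)) ::
            pvRuns (rest.dropWhile (fun x => pvGrp x = g)) := by
  induction rest with
  | nil => intro cur g; simp [pvRunsFrom, pvRuns]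
  | cons r rest ih =>
    intro cur g
    by_cases h : pvGrp r = g
    · simp [pvRunsFrom, h, ih]
    · simp [pvRunsFrom, h, pvRuns, ih]

lemma pvRuns_cons (r : List (String × String)) (rest : List (List (String × String))) :
    pvRuns (r :: rest)
      = (r :: rest.takeWhile (fun x => pvGrp x = pvGrp r)) ::
          pvRuns (rest.dropWhile (fun x => pvGrp x = pvGrp r)) := by
  show pvRunsFrom [r] (pvGrp r) rest = _
  rw [pvRunsFrom_eq]; simp

def pvChangesG (g : List Char) : List (List (String × String)) → Nat
  | [] => 0
  | r :: rest => (if pvGrp r = g then 0 else 1) + pvChangesG (pvGrp r) rest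

lemma pvRunsFrom_length_eq (rest : List (List (String × String))) :
    ∀ (cur : List (List (String × String))) (g : List Char),
      (pvRunsFrom cur g rest).length = pvChangesG g rest + 1 := by
  induction rest with
  | nil => intro cur g; simp [pvRunsFrom, pvChangesG]
  | cons r rest ih =>
    intro cur g
    by_cases h : pvGrp r = g
    · simp [pvRunsFrom, pvChangesG, h, ih]
    · simp [pvRunsFrom, pvChangesG, h, ih]
      omega

lemma pvChangesG_eq (rest : List (List (String × String))) :
    ∀ (a : List (String × String)), pvChangesG (pvGrp a) rest = pvChanges (a :: rest) := by
  induction rest with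
  | nil => intro a; simp [pvChangesG, pvChanges]
  | cons r rest ih =>
    intro a
    have hc : pvChanges (a :: r :: rest)
        = (if pvGrp a ≠ pvGrp r then 1 else 0) + pvChanges (r :: rest) := by
      simp only [pvChanges, List.tail_cons, List.zip_cons_cons, List.filter_cons]
      by_cases h : pvGrp a = pvGrp r
      · simp [h]
      · simp [h]
        omega
    rw [hc, ← ih r]
    simp only [pvChangesG]
    have hiff : (pvGrp a ≠ pvGrp r) ↔ (pvGrp r ≠ pvGrp a) := ne_comm
    rw [if_congr hiff rfl rfl]
    by_cases h : pvGrp r = pvGrp a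
    · simp [h]
    · simp only [if_neg (by simpa using h)]
      simp [h]

lemma pvRuns_length_eq (l : List (List (String × String))) (h : l ≠ []) :
    (pvRuns l).length = pvChanges l + 1 := by
  cases l with
  | nil => exact absurd rfl h
  | cons a rest =>
    show (pvRunsFrom [a] (pvGrp a) rest).length = _
    rw [pvRunsFrom_length_eq, pvChangesG_eq]

lemma pv_getD_of_drop (l : List (List (String × String))) (i : Nat) (y : List (String × String))
    (t : List (List (String × String))) (h : l.drop i = y :: t) : l.getD i [] = y := by
  have h0 : l[i]? = some y := by
    have := List.getElem?_drop (xs := l) (i := i) (j := 0)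
    rw [h] at this; simpa using this.symm
  simp [List.getD_eq_getElem?_getD, h0]

lemma pvInnerA_break (list1 : List (List (String × String))) (cur1 : List Char) :
    ∀ (d : List (List (String × String))) (regs1 : List (List (String × String))) (j : Nat)
      (x : List (String × String)) (v'' : List (List (String × String))),
      list1.drop j = d ++ x :: v'' → (∀ r ∈ d, pvGrp r = cur1) → pvGrp x ≠ cur1 →
      pvInnerA list1 cur1 regs1 j = (true, regs1 ++ d, pvGrp x, j + d.length) := by
  intro d
  induction d with
  | nil =>
    intro regs1 j x v'' hdrop _ hx
    have hj : j < list1.length := by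
      have : list1.drop j ≠ [] := by simp [hdrop]
      rw [Ne, List.drop_eq_nil_iff] at this; omega
    have hg : list1.getD j [] = x := pv_getD_of_drop _ _ _ _ (by simpa using hdrop)
    have hg2 : list1[j] = x := by
      have h2 := hg
      rwa [List.getD_eq_getElem?_getD, List.getElem?_eq_getElem hj, Option.getD_some] at h2
    rw [pvInnerA]; simp [hj, hg2, hx]
  | cons a d' ih =>
    intro regs1 j x v'' hdrop hmem hx
    have hj : j < list1.length := by
      have : list1.drop j ≠ [] := by simp [hdrop]
      rw [Ne, List.drop_eq_nil_iff] at this; omega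
    have hg : list1.getD j [] = a := pv_getD_of_drop _ _ _ _ (by simpa using hdrop)
    have ha : pvGrp a = cur1 := hmem a (by simp)
    have hdrop' : list1.drop (j + 1) = d' ++ x :: v'' := by
      have := List.drop_drop (i := 1) (j := j) (l := list1)
      rw [hdrop] at this; simpa using this.symm
    rw [pvInnerA]; simp only [hj, dif_pos, hg, ha]
    rw [if_neg (by simp)]
    rw [ih (regs1 ++ [a]) (j + 1) x v'' hdrop' (fun r hr => hmem r (by simp [hr])) hx]
    simp; omega

lemma pvLoopA_run (list0 list1 : List (List (String × String))) (cur0 cur1 : List Char) :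
    ∀ (c : List (List (String × String))) (f : Nat) (ordered regs0 regs1 : List (List (String × String)))
      (i j : Nat) (u' : List (List (String × String))),
      list0.drop i = c ++ u' → (∀ r ∈ c, pvGrp r = cur0) →
      pvLoopA list0 list1 (c.length + f) ordered regs0 regs1 cur0 cur1 i j
        = pvLoopA list0 list1 f ordered (regs0 ++ c) regs1 cur0 cur1 (i + c.length) j := by
  intro c
  induction c with
  | nil => intro f ordered regs0 regs1 i j u' _ _; simp
  | cons a c' ih =>
    intro f ordered regs0 regs1 i j u' hdrop hmem
    have hi : i < list0.length := by
      have : list0.drop i ≠ [] := by simp [hdrop]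
      rw [Ne, List.drop_eq_nil_iff] at this; omega
    have hg : list0.getD i [] = a := pv_getD_of_drop _ _ _ _ (by simpa using hdrop)
    have ha : pvGrp a = cur0 := hmem a (by simp)
    have hdrop' : list0.drop (i + 1) = c' ++ u' := by
      have := List.drop_drop (i := 1) (j := i) (l := list0)
      rw [hdrop] at this; simpa using this.symm
    have hlen : (a :: c').length + f = (c'.length + f) + 1 := by simp; omega
    rw [hlen, pvLoopA]
    simp only [hi, if_pos, hg, ha]
    rw [if_neg (by simp)]
    rw [ih f ordered (regs0 ++ [a]) regs1 (i + 1) j u' hdrop' (fun r hr => hmem r (by simp [hr]))]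
    rw [show regs0 ++ [a] ++ c' = regs0 ++ a :: c' by simp,
        show i + 1 + c'.length = i + (a :: c').length by simp; omega]

lemma pvRunsFrom_flatten (rest : List (List (String × String))) :
    ∀ (cur : List (List (String × String))) (g : List Char),
      (pvRunsFrom cur g rest).flatten = cur ++ rest := by
  induction rest with
  | nil => intro cur g; simp [pvRunsFrom]
  | cons r rest ih =>
    intro cur g
    by_cases h : pvGrp r = g <;> simp [pvRunsFrom, h, ih]

lemma pvRunsFrom_length (rest : List (List (String × String))) :
    ∀ (cur : List (List (String × String))) (g : List Char),
      (pvRunsFrom cur g rest).length ≤ rest.length + 1 := by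
  induction rest with
  | nil => intro cur g; simp [pvRunsFrom]
  | cons r rest ih =>
    intro cur g
    by_cases h : pvGrp r = g
    · simp only [pvRunsFrom, if_pos h]
      exact le_trans (ih _ _) (by simp)
    · simp only [pvRunsFrom, if_neg h, List.length_cons]
      exact Nat.add_le_add_right (ih _ _) 1

lemma pvRuns_ne_nil (l : List (List (String × String))) (h : l ≠ []) : pvRuns l ≠ [] := by
  cases l with
  | nil => simp at h
  | cons r rest => rw [pvRuns_cons]; simp

lemma pvRuns_flatten (l : List (List (String × String))) : (pvRuns l).flatten = l := by
  cases l with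
  | nil => simp [pvRuns]
  | cons r rest => simp [pvRuns, pvRunsFrom_flatten]

lemma pvRuns_length_le (l : List (List (String × String))) : (pvRuns l).length ≤ l.length := by
  cases l with
  | nil => simp [pvRuns]
  | cons r rest => simpa [pvRuns] using pvRunsFrom_length rest [r] (pvGrp r)

lemma pvLoopA_main (list0 list1 : List (List (String × String))) :
    ∀ (fuel : Nat) (u v ordered : List (List (String × String))) (i j : Nat),
      list0.drop i = u → list1.drop j = v → u ≠ [] → v ≠ [] →
      (pvRuns u).length ≤ (pvRuns v).length →
      u.length + (pvRuns u).length ≤ fuel →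
      ∃ ord' r0' r1' j',
        pvLoopA list0 list1 fuel ordered [] [] (pvGrp (u.headD [])) (pvGrp (v.headD [])) i j
          = (ord', r0', r1', list0.length, j') ∧
        ord' ++ r0' ++ list1.drop j' = ordered ++ pvInter (pvRuns u) v := by
  intro fuel
  induction fuel using Nat.strong_induction_on with
  | _ fuel IH =>
  intro u v ordered i j hdu hdv hu hv hruns hfuel
  obtain ⟨h0, rest, rfl⟩ : ∃ h0 rest, u = h0 :: rest := by
    cases u with
    | nil => simp at hu
    | cons a b => exact ⟨a, b, rfl⟩
  obtain ⟨h1, vrest, rfl⟩ : ∃ h1 vrest, v = h1 :: vrest := by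
    cases v with
    | nil => simp at hv
    | cons a b => exact ⟨a, b, rfl⟩
  simp only [List.headD_cons]
  set c : List (List (String × String)) := h0 :: rest.takeWhile (fun x => pvGrp x = pvGrp h0) with hc
  set u' : List (List (String × String)) := rest.dropWhile (fun x => pvGrp x = pvGrp h0) with hu'
  have hcu : c ++ u' = h0 :: rest := by simp [hc, hu']
  have hcall : ∀ r ∈ c, pvGrp r = pvGrp h0 := by
    intro r hr
    rcases List.mem_cons.mp hr with h | h
    · rw [h]
    · simpa using List.mem_takeWhile_imp h
  have hru : pvRuns (h0 :: rest) = c :: pvRuns u' := pvRuns_cons h0 rest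
  have hile : i ≤ list0.length := by
    by_contra hgt
    have : list0.drop i = [] := List.drop_eq_nil_iff.mpr (by omega)
    rw [hdu] at this; simp at this
  have hlendrop : (h0 :: rest).length = list0.length - i := by
    rw [← hdu, List.length_drop]
  have hclen : c.length + u'.length = (h0 :: rest).length := by
    rw [← hcu]; simp
  cases hu'e : u' with
  | nil =>
    have hceq : c = h0 :: rest := by rw [← hcu, hu'e]; simp
    have hrun1 : pvRuns (h0 :: rest) = [c] := by rw [hru, hu'e]; simp [pvRuns]
    have hf1 : (h0 :: rest).length + 1 ≤ fuel := by
      rw [hrun1] at hfuel; simpa using hfuel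
    obtain ⟨f, hfe, hfpos⟩ : ∃ f, fuel = (h0 :: rest).length + f ∧ 1 ≤ f := ⟨fuel - (h0 :: rest).length, by omega, by omega⟩
    rw [hfe]
    rw [pvLoopA_run list0 list1 (pvGrp h0) (pvGrp h1) (h0 :: rest) f ordered [] [] i j []
        (by rw [hdu]; simp) (by simpa [hceq] using hcall)]
    have hiend : i + (h0 :: rest).length = list0.length := by
      have : (h0 :: rest).length ≠ 0 := by simp
      omega
    refine ⟨ordered, [] ++ (h0 :: rest), [], j, ?_, ?_⟩
    · rw [hiend]
      cases f with
      | zero => omega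
      | succ f' => rw [pvLoopA]; simp
    · rw [hrun1, hdv]
      have : pvInter [c] (h1 :: vrest) = c ++ (h1 :: vrest) := by simp [pvInter]
      rw [this, hceq]; simp
  | cons y u'' =>
    set d : List (List (String × String)) := h1 :: vrest.takeWhile (fun x => pvGrp x = pvGrp h1) with hd
    set v2 : List (List (String × String)) := vrest.dropWhile (fun x => pvGrp x = pvGrp h1) with hv2
    have hdv2 : d ++ v2 = h1 :: vrest := by simp [hd, hv2]
    have hdall : ∀ r ∈ d, pvGrp r = pvGrp h1 := by
      intro r hr
      rcases List.mem_cons.mp hr with h | h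
      · rw [h]
      · simpa using List.mem_takeWhile_imp h
    have hrv : pvRuns (h1 :: vrest) = d :: pvRuns v2 := pvRuns_cons h1 vrest
    have hrune : pvRuns u' ≠ [] := pvRuns_ne_nil u' (by rw [hu'e]; simp)
    have hv2ne : v2 ≠ [] := by
      intro hemp
      have h1len : (pvRuns (h1 :: vrest)).length = 1 := by rw [hrv, hemp]; simp [pvRuns]
      have h2len : 2 ≤ (pvRuns (h0 :: rest)).length := by
        rw [hru]
        have := List.length_pos_iff.mpr hrune
        simp; omega
      omega
    obtain ⟨x, v'', hv2e⟩ : ∃ x v'', v2 = x :: v'' := by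
      cases hv2x : v2 with
      | nil => exact absurd hv2x hv2ne
      | cons a b => exact ⟨a, b, rfl⟩
    have hy : ¬ (pvGrp y = pvGrp h0) := by
      have hne : rest.dropWhile (fun x => decide (pvGrp x = pvGrp h0)) ≠ [] := by
        rw [← hu', hu'e]; simp
      have h2 := List.head_dropWhile_not (fun x => decide (pvGrp x = pvGrp h0)) (l := rest) hne
      have h3 : (rest.dropWhile (fun x => decide (pvGrp x = pvGrp h0))).head hne = y := by
        simp [← hu', hu'e]
      rw [h3] at h2; simpa using h2
    have hx : ¬ (pvGrp x = pvGrp h1) := by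
      have hne : vrest.dropWhile (fun x => decide (pvGrp x = pvGrp h1)) ≠ [] := by
        rw [← hv2, hv2e]; simp
      have h2 := List.head_dropWhile_not (fun x => decide (pvGrp x = pvGrp h1)) (l := vrest) hne
      have h3 : (vrest.dropWhile (fun x => decide (pvGrp x = pvGrp h1))).head hne = x := by
        simp [← hv2, hv2e]
      rw [h3] at h2; simpa using h2
    obtain ⟨f, hfe, hfbig⟩ : ∃ f, fuel = c.length + f ∧ u'.length + (pvRuns u').length + 1 ≤ f := by
      refine ⟨fuel - c.length, ?_, ?_⟩ <;>
      · have h3 : (pvRuns (h0 :: rest)).length = (pvRuns u').length + 1 := by rw [hru]; simp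
        have h4 := hfuel
        rw [h3, ← hclen] at h4
        omega
    rw [hfe]
    rw [pvLoopA_run list0 list1 (pvGrp h0) (pvGrp h1) c f ordered [] [] i j u'
        (by rw [hdu, hcu]) hcall]
    obtain ⟨f', rfl⟩ : ∃ f', f = f' + 1 := ⟨f - 1, by omega⟩
    have hdropc : list0.drop (i + c.length) = u' := by
      have hdd := List.drop_drop (i := c.length) (j := i) (l := list0)
      rw [hdu, ← hcu, List.drop_left] at hdd
      exact hdd.symm
    have hic : i + c.length < list0.length := by
      have : list0.drop (i + c.length) ≠ [] := by rw [hdropc, hu'e]; simp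
      rw [Ne, List.drop_eq_nil_iff] at this; omega
    have hgety : list0.getD (i + c.length) [] = y := by
      apply pv_getD_of_drop _ _ _ u''
      rw [hdropc, hu'e]
    have hinner : pvInnerA list1 (pvGrp h1) [] j = (true, [] ++ d, pvGrp x, j + d.length) := by
      apply pvInnerA_break list1 (pvGrp h1) d [] j x v''
      · rw [hdv, ← hdv2, hv2e]
      · exact hdall
      · simpa using hx
    rw [pvLoopA]
    simp only [hic, if_pos, hgety]
    rw [if_pos (by simpa using hy), hinner]
    have hdropd : list1.drop (j + d.length) = v2 := by
      have hdd := List.drop_drop (i := d.length) (j := j) (l := list1)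
      rw [hdv, ← hdv2, List.drop_left] at hdd
      exact hdd.symm
    obtain ⟨ord', r0', r1', j', heq, hval⟩ :=
      IH f' (by omega) u' v2 (ordered ++ ([] ++ c) ++ ([] ++ d)) (i + c.length) (j + d.length)
        hdropc hdropd (by rw [hu'e]; simp) hv2ne
        (by have h5 := hfuel
            rw [hru, hrv] at hruns
            simpa using hruns)
        (by omega)
    have hheadu : u'.headD [] = y := by rw [hu'e]; rfl
    have hheadv : v2.headD [] = x := by rw [hv2e]; rfl
    rw [hheadu, hheadv] at heq
    refine ⟨ord', r0', r1', j', heq, ?_⟩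
    rw [hval, hru]
    obtain ⟨c2, rs, hc2⟩ : ∃ c2 rs, pvRuns u' = c2 :: rs := by
      cases hpr : pvRuns u' with
      | nil => exact absurd hpr hrune
      | cons a b => exact ⟨a, b, rfl⟩
    rw [hc2]
    have : pvInter (c :: c2 :: rs) (h1 :: vrest)
        = c ++ d ++ pvInter (c2 :: rs) v2 := by
      simp [pvInter, hd, hv2]
    rw [this, ← hc2, hu'e]
    simp

lemma pv_foldl_append (l : List (List (List (String × String)))) :
    ∀ (a : List (List (String × String))), l.foldl (fun acc r => acc ++ r) a = a ++ l.flatten := by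
  induction l with
  | nil => intro a; simp
  | cons h t ih => intro a; simp [ih, List.flatten]

lemma pvRunsB_eq (l : List (List (String × String))) : pvRunsB l = pvRuns l := by
  cases l with
  | nil => simp [pvRunsB, pvRuns]
  | cons r0 rest =>
    show _ = pvRunsFrom [r0] (pvGrp r0) rest
    have key : ∀ (rest : List (List (String × String)))
        (out : List (List (List (String × String)))) (cur : List (List (String × String))) (g : List Char),
        (let st := rest.foldl
          (fun (acc : List (List (List (String × String))) × List (List (String × String)) × List Char) reg =>
            let g2 := pvGrp reg
            if g2 = acc.2.2 then (acc.1, acc.2.1 ++ [reg], acc.2.2)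
            else (acc.1 ++ [acc.2.1], [reg], g2))
          (out, cur, g)
        st.1 ++ [st.2.1]) = out ++ pvRunsFrom cur g rest := by
      intro rest
      induction rest with
      | nil => intro out cur g; simp [pvRunsFrom]
      | cons r rest ih =>
        intro out cur g
        by_cases h : pvGrp r = g
        · simpa [pvRunsFrom, h] using ih out (cur ++ [r]) g
        · simpa [pvRunsFrom, h] using ih (out ++ [cur]) [r] (pvGrp r)
    simpa using key rest [] [r0] (pvGrp r0)

lemma pv_foldl_append2 (F G : Nat → List (List (String × String))) (l : List Nat) :
    ∀ (a : List (List (String × String))),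
      l.foldl (fun acc t => acc ++ F t ++ G t) a = a ++ (l.map (fun t => F t ++ G t)).flatten := by
  induction l with
  | nil => intro a; simp
  | cons h t ih => intro a; simp

lemma pv_alt_closed : ∀ (rs0 : List (List (List (String × String)))) (v : List (List (String × String))),
    rs0 ≠ [] → rs0.length ≤ (pvRuns v).length →
    ((List.range (rs0.length - 1)).map (fun t => rs0.getD t [] ++ (pvRuns v).getD t [])).flatten
      ++ (rs0.getLast?.getD []) ++ ((pvRuns v).drop (rs0.length - 1)).flatten = pvInter rs0 v := by
  intro rs0
  induction rs0 with
  | nil => intro v h; simp at h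
  | cons c rs0' ih =>
    intro v _ hlen
    cases rs0' with
    | nil => simp [pvInter, pvRuns_flatten]
    | cons c2 rs0'' =>
      obtain ⟨x, vr, rfl⟩ : ∃ x vr, v = x :: vr := by
        cases v with
        | nil => simp [pvRuns] at hlen
        | cons a b => exact ⟨a, b, rfl⟩
      rw [pvRuns_cons] at hlen ⊢
      set d : List (List (String × String)) := x :: vr.takeWhile (fun r => pvGrp r = pvGrp x) with hd
      set v2 : List (List (String × String)) := vr.dropWhile (fun r => pvGrp r = pvGrp x) with hv2
      have hlen2 : (c2 :: rs0'').length ≤ (pvRuns v2).length := by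
        simpa using hlen
      have hIH := ih v2 (by simp) hlen2
      have hinter : pvInter (c :: c2 :: rs0'') (x :: vr)
          = c ++ d ++ pvInter (c2 :: rs0'') v2 := by
        simp [pvInter, hd, hv2]
      rw [hinter, ← hIH]
      simp only [List.length_cons, Nat.add_sub_cancel, List.range_succ_eq_map,
        List.map_cons, List.map_map, List.getD_cons_zero, List.flatten_cons,
        List.getLast?_cons_cons, List.drop_succ_cons]
      have hmap : ((List.range rs0''.length).map
            ((fun t => (c :: c2 :: rs0'').getD t [] ++ (d :: pvRuns v2).getD t []) ∘ Nat.succ))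
          = (List.range rs0''.length).map
            (fun t => (c2 :: rs0'').getD t [] ++ (pvRuns v2).getD t []) := by
        apply List.map_congr_left
        intro t _
        simp [Function.comp]
      rw [hmap]
      simp

lemma pv_alt_inter : ∀ (rs0 : List (List (List (String × String)))) (v : List (List (String × String))),
    rs0 ≠ [] → rs0.length ≤ (pvRuns v).length →
    (match rs0.getLast? with
     | none => (List.range (rs0.length - 1)).foldl
         (fun acc t => acc ++ rs0.getD t [] ++ (pvRuns v).getD t []) []
     | some last => ((pvRuns v).drop (rs0.length - 1)).foldl (fun acc r => acc ++ r)
         (((List.range (rs0.length - 1)).foldl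
             (fun acc t => acc ++ rs0.getD t [] ++ (pvRuns v).getD t []) []) ++ last))
      = pvInter rs0 v := by
  intro rs0 v h0 hlen
  obtain ⟨last, hlast⟩ : ∃ last, rs0.getLast? = some last := by
    cases h : rs0.getLast? with
    | none => rw [List.getLast?_eq_none_iff] at h; exact absurd h h0
    | some a => exact ⟨a, rfl⟩
  rw [hlast]
  dsimp only
  rw [pv_foldl_append2 (fun t => rs0.getD t []) (fun t => (pvRuns v).getD t [])]
  rw [pv_foldl_append]
  have := pv_alt_closed rs0 v h0 hlen
  rw [hlast] at this
  simpa using this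

-- ===== VERDICT (by name: the statement is the Claim_ definition above) =====
theorem order_m_regs_spec : Claim_equal_order_m_regs := by
  unfold Claim_equal_order_m_regs
  intro t _hDom hPre
  obtain ⟨h0ne, h1ne, _, _, hchg⟩ := hPre
  unfold Spec_order_m_regs
  set l0 := t.getD 0 [] with hl0
  set l1 := t.getD 1 [] with hl1
  obtain ⟨a0, l0r, hl0e⟩ : ∃ a0 l0r, l0 = a0 :: l0r := by
    cases hc : l0 with
    | nil => exact absurd hc h0ne
    | cons a b => exact ⟨a, b, rfl⟩
  obtain ⟨a1, l1r, hl1e⟩ : ∃ a1 l1r, l1 = a1 :: l1r := by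
    cases hc : l1 with
    | nil => exact absurd hc h1ne
    | cons a b => exact ⟨a, b, rfl⟩
  have hruns : (pvRuns (t.getD 0 [])).length ≤ (pvRuns (t.getD 1 [])).length := by
    rw [pvRuns_length_eq _ h0ne, pvRuns_length_eq _ h1ne]; omega
  obtain ⟨ord', r0', r1', j', heq, hval⟩ :=
    pvLoopA_main l0 l1 (2 * l0.length + 2) l0 l1 [] 0 0 (by simp) (by simp) h0ne h1ne hruns
      (by have := pvRuns_length_le l0; omega)
  have hcur0 : l0.getD 0 [] = l0.headD [] := by rw [hl0e]; rfl
  have hcur1 : l1.getD 0 [] = l1.headD [] := by rw [hl1e]; rfl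
  have hA : order_m_regs t = ord' ++ r0' ++ l1.drop j' := by
    unfold order_m_regs
    dsimp only
    rw [hcur0, hcur1, heq]
    rw [if_pos rfl]
  have hB : order_m_regs_alt t = pvInter (pvRuns l0) l1 := by
    unfold order_m_regs_alt
    dsimp only
    rw [pvRunsB_eq, pvRunsB_eq]
    exact pv_alt_inter (pvRuns l0) l1 (pvRuns_ne_nil l0 h0ne) hruns
  rw [hA, hB]
  simpa using hval
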